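-- pv_equiv track=rewrite | github.com/testing32/rossman | rossmann_lr.py | get_day_of_week_list
-- ===== SOURCE A (Python) =====
-- def get_day_of_week_list(day):
--     day_list = []
--
--     for i in range(1, 8):
--         if day == str(i):
--             day_list.append(1)
--         else:
--             day_list.append(0)
--
--     return day_list
-- ===== SOURCE B (Python) =====
-- def get_day_of_week_list(day):
--     result = [0] * 7
--     if isinstance(day, str) and len(day) == 1 and '1' <= day <= '7':
--         result[ord(day) - ord('1')] = 1
--     return result
-- ===== Notes on version B (the rewrite author's own statement) =====
-- stated objective: simpler
-- what changed: B replaces the seven-iteration loop of string comparisons with a preallocated zero list of length seven and a single direct index assignment computed from the character code when the input is a one-character digit string in the valid weekday range.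
import Mathlib
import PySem

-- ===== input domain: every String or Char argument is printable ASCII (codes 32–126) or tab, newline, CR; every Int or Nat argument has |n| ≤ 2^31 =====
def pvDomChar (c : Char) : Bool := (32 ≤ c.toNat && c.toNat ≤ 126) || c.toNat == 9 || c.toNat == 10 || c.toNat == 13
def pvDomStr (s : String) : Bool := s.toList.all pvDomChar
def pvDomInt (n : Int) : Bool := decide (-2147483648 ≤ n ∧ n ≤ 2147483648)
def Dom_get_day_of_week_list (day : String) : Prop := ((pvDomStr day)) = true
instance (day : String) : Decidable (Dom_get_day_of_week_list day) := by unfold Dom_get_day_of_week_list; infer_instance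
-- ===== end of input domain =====

-- B replaces A's seven-iteration loop of string comparisons by a preallocated zero list and
-- a single direct index assignment computed from the character code (objective: simpler).

-- ===== PORT A =====
-- loop: for i in range(1,8): append 1 if day == str(i) else 0
def get_day_of_week_list (day : String) : List Int :=
  (PySem.List.pyRange 1 8 1).foldl
    (fun day_list i => day_list ++ [if day = PySem.Int.toStr i then (1 : Int) else 0]) []

-- ===== PORT B =====
-- result = [0]*7; if single char '1'..'7': result[ord(day)-ord('1')] = 1
def get_day_of_week_list_alt (day : String) : List Int :=
  let result : List Int := List.replicate 7 0
  match day.toList with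
  | [c] => if '1' ≤ c ∧ c ≤ '7' then result.set (c.toNat - '1'.toNat) 1 else result
  | _ => result

-- ===== PRECONDITION & SPEC =====
def Spec_get_day_of_week_list (day : String) (out : List Int) : Prop := out = get_day_of_week_list_alt day
instance (day : String) (out : List Int) : Decidable (Spec_get_day_of_week_list day out) := by unfold Spec_get_day_of_week_list; infer_instance

-- ===== CLAIM (what is proved, stated in full; the proofs are below) =====
def Claim_equal_get_day_of_week_list : Prop := ∀ (day : String), Dom_get_day_of_week_list day → Spec_get_day_of_week_list day (get_day_of_week_list day)

-- ===== LEMMAS AND PROOFS =====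

-- A's loop, fully unrolled over range(1,8)
theorem portA_unrolled (day : String) :
    get_day_of_week_list day =
      [if day = "1" then 1 else 0, if day = "2" then 1 else 0, if day = "3" then 1 else 0,
       if day = "4" then 1 else 0, if day = "5" then 1 else 0, if day = "6" then 1 else 0,
       if day = "7" then 1 else 0] := by
  have hr : PySem.List.pyRange 1 8 1 = [1, 2, 3, 4, 5, 6, 7] := by decide
  have h1 : PySem.Int.toStr 1 = "1" := by decide
  have h2 : PySem.Int.toStr 2 = "2" := by decide
  have h3 : PySem.Int.toStr 3 = "3" := by decide
  have h4 : PySem.Int.toStr 4 = "4" := by decide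
  have h5 : PySem.Int.toStr 5 = "5" := by decide
  have h6 : PySem.Int.toStr 6 = "6" := by decide
  have h7 : PySem.Int.toStr 7 = "7" := by decide
  simp [get_day_of_week_list, hr, List.foldl, h1, h2, h3, h4, h5, h6, h7]

theorem main_equiv (day : String) :
    get_day_of_week_list day = get_day_of_week_list_alt day := by
  rw [portA_unrolled]
  have key : ∀ t : String, (day = t) ↔ (day.toList = t.toList) := fun t => String.toList_inj.symm
  simp only [key, get_day_of_week_list_alt]
  rcases h : day.toList with _ | ⟨c, _ | ⟨c2, rest⟩⟩
  · decide
  · by_cases hc : '1' ≤ c ∧ c ≤ '7'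
    · have hb : 49 ≤ c.toNat ∧ c.toNat ≤ 55 := by
        obtain ⟨l, u⟩ := hc
        constructor
        · exact UInt32.le_iff_toNat_le.mp l
        · exact UInt32.le_iff_toNat_le.mp u
      have hcases : c = '1' ∨ c = '2' ∨ c = '3' ∨ c = '4' ∨ c = '5' ∨ c = '6' ∨ c = '7' := by
        have hn : c.toNat = 49 ∨ c.toNat = 50 ∨ c.toNat = 51 ∨ c.toNat = 52 ∨
            c.toNat = 53 ∨ c.toNat = 54 ∨ c.toNat = 55 := by omega
        have inj : ∀ d : Char, c.toNat = d.toNat → c = d := by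
          intro d hd
          apply Char.ext
          exact UInt32.toNat_inj.mp hd
        rcases hn with h' | h' | h' | h' | h' | h' | h'
        · exact Or.inl (inj '1' h')
        · exact Or.inr (Or.inl (inj '2' h'))
        · exact Or.inr (Or.inr (Or.inl (inj '3' h')))
        · exact Or.inr (Or.inr (Or.inr (Or.inl (inj '4' h'))))
        · exact Or.inr (Or.inr (Or.inr (Or.inr (Or.inl (inj '5' h')))))
        · exact Or.inr (Or.inr (Or.inr (Or.inr (Or.inr (Or.inl (inj '6' h'))))))
        · exact Or.inr (Or.inr (Or.inr (Or.inr (Or.inr (Or.inr (inj '7' h'))))))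
      rcases hcases with h' | h' | h' | h' | h' | h' | h' <;> subst h' <;> decide
    · have n1 : c ≠ '1' := fun e => hc (by subst e; exact ⟨by decide, by decide⟩)
      have n2 : c ≠ '2' := fun e => hc (by subst e; exact ⟨by decide, by decide⟩)
      have n3 : c ≠ '3' := fun e => hc (by subst e; exact ⟨by decide, by decide⟩)
      have n4 : c ≠ '4' := fun e => hc (by subst e; exact ⟨by decide, by decide⟩)
      have n5 : c ≠ '5' := fun e => hc (by subst e; exact ⟨by decide, by decide⟩)
      have n6 : c ≠ '6' := fun e => hc (by subst e; exact ⟨by decide, by decide⟩)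
      have n7 : c ≠ '7' := fun e => hc (by subst e; exact ⟨by decide, by decide⟩)
      simp [hc, n1, n2, n3, n4, n5, n6, n7, List.replicate]
  · simp [List.replicate]

-- ===== VERDICT (by name: the statement is the Claim_ definition above) =====
theorem get_day_of_week_list_spec : Claim_equal_get_day_of_week_list := by
  intro day _
  exact main_equiv day
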